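-- pv_equiv track=rewrite | github.com/MillionConcepts/quickseries | quickseries/expansions.py | additive_combinations
-- ===== SOURCE A (Python) =====
-- def additive_combinations(n_terms, number):
--     if n_terms == 1:
--         return [(n,) for n in range(number + 1)]
--     combinations = []  # NOTE: this is super gross-looking written as a chain
--     for j in range(number + 1):
--         combinations += [
--             (j, *t) for t in additive_combinations(n_terms - 1, number - j)
--         ]
--     return combinations
-- ===== SOURCE B (Python) =====
-- def additive_combinations(n_terms, number):
--     # Iterative breadth-first construction: extend every partial tuple by one
--     # coordinate per round, tracking the remaining budget; stop early when no
--     # partial tuple survives.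
--     partials = [((), number)]
--     for _ in range(n_terms):
--         partials = [(p + (j,), r - j) for p, r in partials for j in range(r + 1)]
--         if not partials:
--             break
--     return [p for p, _ in partials]
-- ===== Notes on version B (the rewrite author's own statement) =====
-- stated objective: alternative
-- what changed: Replaces A's depth-first recursion on the first coordinate with an iterative breadth-first sweep: one loop over the coordinates that extends every partial tuple by its next entry within the remaining budget, emitting the same lexicographic order.
-- outside the precondition, e.g. on additive_combinations(-1, -1): A returns [], B returns [()]; on additive_combinations(0, -2): A returns [], B returns [()]
import Mathlib
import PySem

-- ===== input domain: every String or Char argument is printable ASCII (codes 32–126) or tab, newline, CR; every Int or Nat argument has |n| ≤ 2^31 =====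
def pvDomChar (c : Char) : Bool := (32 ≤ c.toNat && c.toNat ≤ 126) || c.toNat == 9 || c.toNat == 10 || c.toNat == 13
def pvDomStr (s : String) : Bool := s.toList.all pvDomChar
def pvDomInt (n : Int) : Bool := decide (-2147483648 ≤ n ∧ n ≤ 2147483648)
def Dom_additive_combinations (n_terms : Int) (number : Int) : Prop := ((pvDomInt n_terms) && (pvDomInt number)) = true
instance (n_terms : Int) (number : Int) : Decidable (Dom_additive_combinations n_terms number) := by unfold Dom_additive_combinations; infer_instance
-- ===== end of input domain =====

-- B replaces A's depth-first recursion by an iterative breadth-first level sweep with a remaining-budget counter (alternative decomposition, same output order).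

-- ===== PORT A =====
def additive_combinations (n_terms : Int) (number : Int) : List (List Int) :=
  if n_terms = 1 then
    (PySem.List.pyRange 0 (number + 1) 1).map (fun n => [n])
  else if n_terms ≤ 0 then [] -- Python recurses forever here (RecursionError); excluded by Pre_
  else
    (PySem.List.pyRange 0 (number + 1) 1).foldl
      (fun combinations j =>
        combinations ++
          (additive_combinations (n_terms - 1) (number - j)).map (fun t => j :: t))
      []
termination_by n_terms.toNat
decreasing_by omega

-- ===== PORT B =====
-- one round of the loop body: extend every (partial tuple, remaining budget) pair
def acStep (partials : List (List Int × Int)) : List (List Int × Int) :=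
  partials.flatMap (fun q =>
    (PySem.List.pyRange 0 (q.2 + 1) 1).map (fun j => (q.1 ++ [j], q.2 - j)))

-- the 'for _ in range(n_terms): … if not partials: break' loop
def acLoop (partials : List (List Int × Int)) : Nat → List (List Int × Int)
  | 0 => partials
  | n + 1 =>
    let next := acStep partials
    if next = [] then next else acLoop next n

def additive_combinations_alt (n_terms : Int) (number : Int) : List (List Int) :=
  (acLoop [([], number)] n_terms.toNat).map (fun q => q.1)

-- ===== PRECONDITION & SPEC =====
-- Pre_ excludes the out-of-contract n_terms ≤ 0 (no tuple has a nonpositive length): there A recurses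
-- without bound when number ≥ 0 (RecursionError), and when number < 0 falls through its empty loop to [],
-- an accidental value as defensible as B's [()] from its empty sweep.
def Pre_additive_combinations (n_terms : Int) (number : Int) : Prop := 1 ≤ n_terms
instance (n_terms : Int) (number : Int) : Decidable (Pre_additive_combinations n_terms number) := by unfold Pre_additive_combinations; infer_instance
def pvWitness_additive_combinations : Int × Int := (2, 3)

def Spec_additive_combinations (n_terms : Int) (number : Int) (out : List (List Int)) : Prop := out = additive_combinations_alt n_terms number
instance (n_terms : Int) (number : Int) (out : List (List Int)) : Decidable (Spec_additive_combinations n_terms number out) := by unfold Spec_additive_combinations; infer_instance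

-- ===== CLAIM (what is proved, stated in full; the proofs are below) =====
def Claim_equal_additive_combinations : Prop := ∀ (n_terms : Int) (number : Int), Dom_additive_combinations n_terms number → Pre_additive_combinations n_terms number → Spec_additive_combinations n_terms number (additive_combinations n_terms number)

-- ===== LEMMAS AND PROOFS =====

theorem flatMap_congr' {α β : Type} {l : List α} {f g : α → List β}
    (h : ∀ a ∈ l, f a = g a) : l.flatMap f = l.flatMap g := by
  induction l with
  | nil => rfl
  | cons x xs ih =>
    simp only [List.flatMap_cons]
    rw [h x (by simp), ih (fun a ha => h a (by simp [ha]))]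

theorem acStep_append (P Q : List (List Int × Int)) :
    acStep (P ++ Q) = acStep P ++ acStep Q := by
  simp [acStep]

theorem acStep_iterate_append (n : Nat) :
    ∀ (P Q : List (List Int × Int)),
      acStep^[n] (P ++ Q) = acStep^[n] P ++ acStep^[n] Q := by
  induction n with
  | zero => intro P Q; rfl
  | succ n ih =>
    intro P Q
    simp only [Function.iterate_succ_apply, acStep_append, ih]

theorem acStep_iterate_nil (n : Nat) : acStep^[n] ([] : List (List Int × Int)) = [] := by
  induction n with
  | zero => rfl
  | succ n ih => simp only [Function.iterate_succ_apply, acStep, List.flatMap_nil, ih]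

-- the early break does not change the value: stepping [] yields []
theorem acLoop_eq_iterate : ∀ (n : Nat) (P : List (List Int × Int)),
    acLoop P n = acStep^[n] P := by
  intro n
  induction n with
  | zero => intro P; rfl
  | succ n ih =>
    intro P
    rw [acLoop, Function.iterate_succ_apply]
    by_cases h : acStep P = []
    · simp only [h, if_true, acStep_iterate_nil]
    · simp only [if_neg h, ih]

theorem acStep_iterate_map {α : Type} (n : Nat) (h : α → List Int × Int) :
    ∀ (l : List α),
      acStep^[n] (l.map h) = l.flatMap (fun x => acStep^[n] [h x]) := by
  intro l
  induction l with
  | nil => simp [acStep_iterate_nil]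
  | cons x xs ih =>
    simp only [List.map_cons, List.flatMap_cons, ← ih]
    rw [show h x :: xs.map h = [h x] ++ xs.map h from rfl, acStep_iterate_append]

-- the breadth-first sweep started from one partial (p, c) produces exactly
-- A's tuples for budget c, each prefixed with p and paired with its leftover budget
theorem acStep_iterate_singleton :
    ∀ (m : Nat) (p : List Int) (c : Int),
      acStep^[m + 1] [(p, c)]
        = (additive_combinations ((m : Int) + 1) c).map (fun t => (p ++ t, c - t.sum)) := by
  intro m
  induction m with
  | zero =>
    intro p c
    rw [additive_combinations, if_pos (by norm_num)]
    simp [acStep, List.map_map, Function.comp]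
  | succ m ih =>
    intro p c
    rw [Function.iterate_succ_apply]
    rw [show acStep [(p, c)]
        = (PySem.List.pyRange 0 (c + 1) 1).map (fun j => (p ++ [j], c - j)) by
      simp [acStep]]
    rw [acStep_iterate_map]
    rw [flatMap_congr' (g := fun j =>
        (additive_combinations ((m : Int) + 1) (c - j)).map
          (fun t => (p ++ (j :: t), c - (j :: t).sum)))
        (by
          intro j hj
          dsimp only
          rw [ih (p ++ [j]) (c - j)]
          apply List.map_congr_left
          intro t _
          simp only [List.sum_cons, List.append_assoc, List.singleton_append,
            Prod.mk.injEq, true_and]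
          ring)]
    -- unfold A on the right
    rw [additive_combinations]
    rw [if_neg (by omega), if_neg (by omega)]
    rw [PySem.List.foldl_append_eq_flatMap, List.nil_append, List.map_flatMap]
    apply flatMap_congr'
    intro j hj
    rw [show (((m + 1 : Nat) : Int) + 1) - 1 = (m : Int) + 1 by push_cast; ring]
    simp [Function.comp, List.map_map]

-- ===== VERDICT (by name: the statement is the Claim_ definition above) =====
theorem additive_combinations_spec : Claim_equal_additive_combinations := by
  intro n_terms number _ hpre
  unfold Spec_additive_combinations additive_combinations_alt
  obtain ⟨k, rfl⟩ : ∃ k : Nat, n_terms = (k : Int) + 1 :=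
    ⟨(n_terms - 1).toNat, by unfold Pre_additive_combinations at hpre; omega⟩
  rw [show ((k : Int) + 1).toNat = k + 1 by omega]
  rw [acLoop_eq_iterate, acStep_iterate_singleton k [] number]
  simp only [List.map_map, List.nil_append]
  exact (List.map_id _).symm
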